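-- pv_equiv track=rewrite | github.com/pypi-data/pypi-mirror-376 | packages/paper-voice/paper_voice-0.1.0-py3-none-any.whl/paper_voice/latex_processor.py | _tokenize_latex
-- ===== SOURCE A (Python) =====
-- from typing import Dict, List, Tuple, Optional, Union
--
-- def _tokenize_latex(expr: str) -> List[str]:
--     """Tokenize LaTeX expression."""
--     tokens = []
--     i = 0
--
--     while i < len(expr):
--         if expr[i] == '\\':
--             # LaTeX command
--             j = i + 1
--             while j < len(expr) and expr[j].isalpha():
--                 j += 1
--             tokens.append(expr[i:j])
--             i = j
--         elif expr[i] in {'^', '_', '{', '}', '(', ')', '[', ']', '+', '-', '=',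
--                          '<', '>', '/', '*', ',', '|', '!', '?', ':', ';', '.'}:
--             tokens.append(expr[i])
--             i += 1
--         elif expr[i].isspace():
--             i += 1
--         else:
--             # Collect alphanumeric sequences
--             j = i
--             while j < len(expr) and (expr[j].isalnum() or expr[j] == '_'):
--                 j += 1
--             if j > i:
--                 tokens.append(expr[i:j])
--                 i = j
--             else:
--                 tokens.append(expr[i])
--                 i += 1
--
--     return tokens
-- ===== SOURCE B (Python) =====
-- from typing import List
--
-- _SPECIALS = {'^', '_', '{', '}', '(', ')', '[', ']', '+', '-', '=',
--              '<', '>', '/', '*', ',', '|', '!', '?', ':', ';', '.'}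
--
-- def _tokenize_latex(expr: str) -> List[str]:
--     """Tokenize LaTeX expression (single left-to-right pass with a pending buffer)."""
--     tokens: List[str] = []
--     buf = ''  # pending command (starts with '\\') or alphanumeric run
--     for ch in expr:
--         if buf:
--             if buf[0] == '\\':
--                 if ch.isalpha():
--                     buf += ch
--                     continue
--             elif ch.isalnum() or ch == '_':
--                 buf += ch
--                 continue
--             tokens.append(buf)
--             buf = ''
--         if ch == '\\':
--             buf = ch
--         elif ch in _SPECIALS:
--             tokens.append(ch)
--         elif ch.isspace():
--             pass
--         elif ch.isalnum():
--             buf = ch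
--         else:
--             tokens.append(ch)
--     if buf:
--         tokens.append(buf)
--     return tokens
-- ===== Notes on version B (the rewrite author's own statement) =====
-- stated objective: simpler
-- what changed: Replaced A's index-based while loop with nested inner scanning loops and slicing by a single character-by-character pass that maintains a pending-token buffer (command or alphanumeric run) flushed at boundaries.
import Mathlib
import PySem

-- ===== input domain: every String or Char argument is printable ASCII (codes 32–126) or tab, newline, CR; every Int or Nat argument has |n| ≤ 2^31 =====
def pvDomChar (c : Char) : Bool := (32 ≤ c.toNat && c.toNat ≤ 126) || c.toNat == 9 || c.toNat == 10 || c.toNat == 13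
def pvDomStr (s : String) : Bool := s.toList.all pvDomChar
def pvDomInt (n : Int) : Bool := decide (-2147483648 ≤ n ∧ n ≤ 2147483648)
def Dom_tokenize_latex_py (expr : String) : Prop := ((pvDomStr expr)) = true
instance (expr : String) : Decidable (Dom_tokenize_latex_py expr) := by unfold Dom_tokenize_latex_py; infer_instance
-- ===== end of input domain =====

-- B replaces A's index-driven while loop (with nested scanning sub-loops and slicing)
-- by a single left-to-right pass over the characters that maintains a pending-token
-- buffer; objective: simpler (one loop, no index arithmetic, no slicing).

-- helpers shared by both ports: the special-character set and the char classes
def pvIsSpecial (c : Char) : Bool :=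
  ['^', '_', '{', '}', '(', ')', '[', ']', '+', '-', '=',
   '<', '>', '/', '*', ',', '|', '!', '?', ':', ';', '.'].contains c

def pvWordChar (c : Char) : Bool := PySem.Chars.isalnum c || c == '_'

-- ===== PORT A =====
-- inner while of the '\\' branch: scan alphabetic run, return (run, rest)
def pvSpanAlpha : List Char → List Char × List Char
  | [] => ([], [])
  | c :: t =>
    if PySem.Chars.isalpha c then
      let r := pvSpanAlpha t
      (c :: r.1, r.2)
    else ([], c :: t)

-- inner while of the else branch: scan alnum-or-underscore run, return (run, rest)
def pvSpanWord : List Char → List Char × List Char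
  | [] => ([], [])
  | c :: t =>
    if pvWordChar c then
      let r := pvSpanWord t
      (c :: r.1, r.2)
    else ([], c :: t)

theorem pvSpanAlpha_len (l : List Char) : (pvSpanAlpha l).2.length ≤ l.length := by
  induction l with
  | nil => simp [pvSpanAlpha]
  | cons c t ih =>
    simp only [pvSpanAlpha]
    split
    · simpa using le_trans ih (Nat.le_succ _)
    · simp

theorem pvSpanWord_len (l : List Char) :
    (pvSpanWord l).1.length + (pvSpanWord l).2.length = l.length := by
  induction l with
  | nil => simp [pvSpanWord]
  | cons c t ih =>
    simp only [pvSpanWord]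
    split
    · simp only [List.length_cons]
      omega
    · simp

-- A's outer while over the remaining suffix of expr
def tokenize_latex_go : List Char → List String
  | [] => []
  | c :: t =>
    if c = '\\' then
      -- LaTeX command: i..j with expr[j].isalpha()
      let r := pvSpanAlpha t
      String.ofList (c :: r.1) :: tokenize_latex_go r.2
    else if pvIsSpecial c then
      String.ofList [c] :: tokenize_latex_go t
    else if PySem.Chars.isspace c then
      tokenize_latex_go t
    else
      -- collect alphanumeric sequence starting at i (j starts at i)
      let r := pvSpanWord (c :: t)
      if r.1.length > 0 then
        String.ofList r.1 :: tokenize_latex_go r.2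
      else
        String.ofList [c] :: tokenize_latex_go t
  termination_by l => l.length
  decreasing_by
  · have := pvSpanAlpha_len t; simp; omega
  · simp
  · simp
  · rename_i hgt
    have hr := pvSpanWord_len (c :: t)
    have h' : 0 < (pvSpanWord (c :: t)).1.length := hgt
    show (pvSpanWord (c :: t)).2.length < (c :: t).length
    omega
  · simp

def tokenize_latex_py (expr : String) : List String :=
  tokenize_latex_go expr.toList

-- ===== PORT B =====
-- does the pending buffer continue with ch?  (buf[0] == '\\' ? ch.isalpha() : ch.isalnum() or ch == '_')
def pvBCont (buf : List Char) (ch : Char) : Bool :=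
  match buf with
  | '\\' :: _ => PySem.Chars.isalpha ch
  | _ => pvWordChar ch

-- the tail of B's loop body: dispatch ch with an empty buffer
def pvBStart (toks : List String) (ch : Char) : List String × List Char :=
  if ch = '\\' then (toks, [ch])
  else if pvIsSpecial ch then (toks ++ [String.ofList [ch]], [])
  else if PySem.Chars.isspace ch then (toks, [])
  else if PySem.Chars.isalnum ch then (toks, [ch])
  else (toks ++ [String.ofList [ch]], [])

-- one iteration of B's for-loop (the 'continue's desugared)
def pvBStep (st : List String × List Char) (ch : Char) : List String × List Char :=
  if st.2 ≠ [] then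
    if pvBCont st.2 ch then (st.1, st.2 ++ [ch])
    else pvBStart (st.1 ++ [String.ofList st.2]) ch
  else pvBStart st.1 ch

def tokenize_latex_py_alt (expr : String) : List String :=
  let st := expr.toList.foldl pvBStep ([], [])
  if st.2 ≠ [] then st.1 ++ [String.ofList st.2] else st.1

-- ===== PRECONDITION & SPEC =====
def Spec_tokenize_latex_py (expr : String) (out : List String) : Prop := out = tokenize_latex_py_alt expr
instance (expr : String) (out : List String) : Decidable (Spec_tokenize_latex_py expr out) := by unfold Spec_tokenize_latex_py; infer_instance

-- ===== CLAIM (what is proved, stated in full; the proofs are below) =====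
def Claim_equal_tokenize_latex_py : Prop := ∀ (expr : String), Dom_tokenize_latex_py expr → Spec_tokenize_latex_py expr (tokenize_latex_py expr)

-- ===== LEMMAS AND PROOFS =====

-- B's fold from a given state, finished off (flush the buffer)
def pvF (toks : List String) (buf : List Char) (l : List Char) : List String :=
  let st := l.foldl pvBStep (toks, buf)
  if st.2 ≠ [] then st.1 ++ [String.ofList st.2] else st.1

theorem pvF_flush_cmd (l : List Char) : ∀ (toks : List String) (w : List Char),
    pvF toks ('\\' :: w) l
      = pvF (toks ++ [String.ofList ('\\' :: (w ++ (pvSpanAlpha l).1))]) [] (pvSpanAlpha l).2 := by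
  induction l with
  | nil => intro toks w; simp [pvF, pvSpanAlpha]
  | cons c t ih =>
    intro toks w
    by_cases h : PySem.Chars.isalpha c = true
    · have h1 : pvF toks ('\\' :: w) (c :: t) = pvF toks ('\\' :: (w ++ [c])) t := by
        simp [pvF, pvBStep, pvBCont, h]
      rw [h1, ih]
      simp [pvSpanAlpha, h]
    · have h1 : pvF toks ('\\' :: w) (c :: t)
          = pvF (toks ++ [String.ofList ('\\' :: w)]) [] (c :: t) := by
        simp [pvF, pvBStep, pvBCont, h]
      rw [h1]
      simp [pvSpanAlpha, h]

theorem pvF_flush_word (l : List Char) : ∀ (toks : List String) (b : Char) (w : List Char),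
    b ≠ '\\' →
    pvF toks (b :: w) l
      = pvF (toks ++ [String.ofList (b :: (w ++ (pvSpanWord l).1))]) [] (pvSpanWord l).2 := by
  induction l with
  | nil => intro toks b w hb; simp [pvF, pvSpanWord]
  | cons c t ih =>
    intro toks b w hb
    have hcont : pvBCont (b :: w) c = pvWordChar c := by
      simp [pvBCont, hb]
    by_cases h : pvWordChar c = true
    · have h1 : pvF toks (b :: w) (c :: t) = pvF toks (b :: (w ++ [c])) t := by
        simp [pvF, pvBStep, hcont, h]
      rw [h1, ih _ _ _ hb]
      simp [pvSpanWord, h]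
    · have h1 : pvF toks (b :: w) (c :: t)
          = pvF (toks ++ [String.ofList (b :: w)]) [] (c :: t) := by
        simp [pvF, pvBStep, hcont, h]
      rw [h1]
      simp [pvSpanWord, h]

theorem pvF_main : ∀ (n : ℕ) (l : List Char), l.length ≤ n → ∀ (toks : List String),
    pvF toks [] l = toks ++ tokenize_latex_go l := by
  intro n
  induction n with
  | zero =>
    intro l hl toks
    interval_cases hl' : l.length
    · rw [List.length_eq_zero_iff] at hl'
      subst hl'
      simp [pvF, tokenize_latex_go]
  | succ n ih =>
    intro l hl toks
    cases l with
    | nil => simp [pvF, tokenize_latex_go]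
    | cons c t =>
      simp only [List.length_cons, Nat.succ_le_succ_iff] at hl
      by_cases hbs : c = '\\'
      · subst hbs
        have h1 : pvF toks [] ('\\' :: t) = pvF toks ['\\'] t := by
          simp [pvF, pvBStep, pvBStart]
        rw [h1, pvF_flush_cmd t toks []]
        have h2 := ih (pvSpanAlpha t).2 (le_trans (pvSpanAlpha_len t) hl)
            (toks ++ [String.ofList ('\\' :: ([] ++ (pvSpanAlpha t).1))])
        rw [h2]
        simp [tokenize_latex_go]
      · by_cases hsp : pvIsSpecial c = true
        · have h1 : pvF toks [] (c :: t) = pvF (toks ++ [String.ofList [c]]) [] t := by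
            simp [pvF, pvBStep, pvBStart, hbs, hsp]
          rw [h1, ih t hl]
          rw [tokenize_latex_go]
          simp [hbs, hsp]
        · by_cases hws : PySem.Chars.isspace c = true
          · have h1 : pvF toks [] (c :: t) = pvF toks [] t := by
              simp [pvF, pvBStep, pvBStart, hbs, hsp, hws]
            rw [h1, ih t hl]
            rw [tokenize_latex_go]
            simp [hbs, hsp, hws]
          · by_cases han : PySem.Chars.isalnum c = true
            · -- word starting with an alnum char
              have hword : pvWordChar c = true := by simp [pvWordChar, han]
              have h1 : pvF toks [] (c :: t) = pvF toks [c] t := by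
                simp [pvF, pvBStep, pvBStart, hbs, hsp, hws, han]
              rw [h1, pvF_flush_word t toks c [] hbs]
              have hspan : pvSpanWord (c :: t) = (c :: (pvSpanWord t).1, (pvSpanWord t).2) := by
                simp [pvSpanWord, hword]
              have hlen : (pvSpanWord t).2.length ≤ t.length := by
                have := pvSpanWord_len t; omega
              have h2 := ih (pvSpanWord t).2 (le_trans hlen hl)
                  (toks ++ [String.ofList (c :: ([] ++ (pvSpanWord t).1))])
              rw [h2]
              rw [tokenize_latex_go]
              simp [hbs, hsp, hws, hspan]
            · -- lone non-alnum char (not special, not space, not '_', not '\\')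
              have hund : c ≠ '_' := by
                intro hE; subst hE; exact hsp (by decide)
              have hword : pvWordChar c = false := by
                simp [pvWordChar, han, hund]
              have h1 : pvF toks [] (c :: t) = pvF (toks ++ [String.ofList [c]]) [] t := by
                simp [pvF, pvBStep, pvBStart, hbs, hsp, hws, han]
              rw [h1, ih t hl]
              have hspan : pvSpanWord (c :: t) = ([], c :: t) := by
                simp [pvSpanWord, hword]
              rw [tokenize_latex_go]
              simp [hbs, hsp, hws, hspan]

-- ===== VERDICT (by name: the statement is the Claim_ definition above) =====
theorem tokenize_latex_py_spec : Claim_equal_tokenize_latex_py := by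
  intro expr _
  unfold Spec_tokenize_latex_py tokenize_latex_py tokenize_latex_py_alt
  have := pvF_main expr.toList.length expr.toList le_rfl []
  simpa [pvF] using this.symm
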